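-- pv_equiv track=rewrite | github.com/pypi-data/pypi-mirror-254 | packages/nginx-log-stats/nginx_log_stats-1.34.0.tar.gz/nginx_log_stats-1.34.0/src/unique_ips_only.py | unique_ips_only
-- ===== SOURCE A (Python) =====
-- def unique_ips_only(lines):
--     ip_occurances = {}
--     for line in lines:
--         unique_key = line.split(" ")[0]
--         if unique_key not in ip_occurances:
--             ip_occurances[unique_key] = line
--     ans = []
--     for address,entry in ip_occurances.items():
--         ans.append(entry)
--     return ans
-- ===== SOURCE B (Python) =====
-- def unique_ips_only(lines):
--     # Repeated head-selection: precompute keys, then peel off the head line and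
--     # discard every later line sharing its key; no dict/set membership structure.
--     pairs = [(l.split(" ")[0], l) for l in lines]
--     ans = []
--     while pairs:
--         key, head = pairs[0]
--         ans.append(head)
--         pairs = [(k, l) for (k, l) in pairs[1:] if k != key]
--     return ans
-- ===== Notes on version B (the rewrite author's own statement) =====
-- stated objective: alternative
-- what changed: B replaces A's hash-dict of first occurrences (build then copy out values) with a selection-by-repeated-filtering algorithm: precompute (key, line) pairs, then repeatedly take the head and filter out all later pairs with the same key; no dict or set is maintained.
import Mathlib
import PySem

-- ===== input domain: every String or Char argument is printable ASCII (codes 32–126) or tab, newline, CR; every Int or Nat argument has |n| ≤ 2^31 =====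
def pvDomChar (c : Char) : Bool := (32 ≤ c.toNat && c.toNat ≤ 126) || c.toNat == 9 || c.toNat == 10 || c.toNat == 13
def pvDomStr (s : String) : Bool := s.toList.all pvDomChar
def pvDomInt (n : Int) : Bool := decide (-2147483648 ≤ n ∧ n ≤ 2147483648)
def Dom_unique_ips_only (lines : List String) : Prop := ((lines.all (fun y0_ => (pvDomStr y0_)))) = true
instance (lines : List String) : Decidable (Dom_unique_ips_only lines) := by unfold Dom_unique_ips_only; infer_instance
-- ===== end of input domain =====

-- B replaces A's first-occurrence dict with repeated head-selection and filtering over precomputed (key, line) pairs (objective: alternative).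

-- ===== PORT A =====
-- line.split(" ")[0]: split? with the nonempty separator " " is always some of a nonempty list, so getD []/headD "" are exact.
def unique_ips_only (lines : List String) : List String :=
  let d := lines.foldl (fun (d : PySem.Dict String String) line =>
      let key := ((PySem.Str.split? line " ").getD []).headD ""
      if d.contains key then d else d.insert key line)
    PySem.Dict.empty
  d.items.foldl (fun ans p => ans ++ [p.2]) []

-- ===== PORT B =====
-- key of a line: line.split(" ")[0]
def uioKey (l : String) : String := ((PySem.Str.split? l " ").getD []).headD ""

-- the while loop of B: take head pair, filter out later pairs with the same key
def uio_loop (pairs : List (String × String)) (ans : List String) : List String :=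
  match pairs with
  | [] => ans
  | p :: t => uio_loop (t.filter (fun q => q.1 != p.1)) (ans ++ [p.2])
termination_by pairs.length
decreasing_by
  simp only [List.length_cons, List.length_unattach]
  exact Nat.lt_succ_of_le (by simpa using List.length_filter_le _ t.attach)

def unique_ips_only_alt (lines : List String) : List String :=
  uio_loop (lines.map (fun l => (uioKey l, l))) []

-- ===== PRECONDITION & SPEC =====
def Spec_unique_ips_only (lines : List String) (out : List String) : Prop := out = unique_ips_only_alt lines
instance (lines : List String) (out : List String) : Decidable (Spec_unique_ips_only lines out) := by unfold Spec_unique_ips_only; infer_instance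

-- ===== CLAIM =====
def Claim_equal_unique_ips_only : Prop := ∀ (lines : List String), Dom_unique_ips_only lines → Spec_unique_ips_only lines (unique_ips_only lines)

-- ===== LEMMAS AND PROOFS =====

-- Proof-side intermediate: a seen-set fold, bridging A's dict to B's filtering loop.
def uioStep (st : PySem.Set String × List String) (line : String) : PySem.Set String × List String :=
  if PySem.Set.contains st.1 (uioKey line) then st else (PySem.Set.add st.1 (uioKey line), st.2 ++ [line])

-- A's second loop appends each entry: it computes the values list.
theorem foldl_append_snd {α β : Type} (l : List (α × β)) (acc : List β) :
    l.foldl (fun ans p => ans ++ [p.2]) acc = acc ++ l.map Prod.snd := by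
  induction l generalizing acc with
  | nil => simp
  | cons p t ih => simp [List.foldl, ih]

-- Invariant: the seen-set fold's state is (keys of A's dict, values of A's dict) throughout.
theorem uio_invariant (lines : List String) (d : PySem.Dict String String) (hnd : d.keys.Nodup) :
    lines.foldl uioStep (d.keys, d.values)
    = (let d' := lines.foldl (fun (d : PySem.Dict String String) line =>
          let key := ((PySem.Str.split? line " ").getD []).headD ""
          if d.contains key then d else d.insert key line) d
       (d'.keys, d'.values)) := by
  induction lines generalizing d with
  | nil => simp
  | cons line t ih =>
    simp only [List.foldl, uioStep, uioKey]
    set key := ((PySem.Str.split? line " ").getD []).headD "" with hkey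
    have hc : PySem.Set.contains d.keys key = d.contains key := by
      simp [PySem.Set.contains, PySem.Dict.contains_eq_decide_mem_keys]
    by_cases h : d.contains key = true
    · simp only [hc, h, if_true]
      exact ih d hnd
    · have h' : d.contains key = false := by simpa using h
      have hnm : key ∉ d.keys := by
        simp [← PySem.Dict.contains_iff_mem_keys, h']
      simp only [hc, h', Bool.false_eq_true, if_false]
      have hkeys : (d.insert key line).keys = d.keys ++ [key] :=
        PySem.Dict.keys_insert_of_not_contains d line h'
      have hvals : (d.insert key line).values = d.values ++ [line] := by
        have := PySem.Dict.items_insert_of_not_contains (v := line) (h := h')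
        simp [PySem.Dict.values, this]
      have hadd : PySem.Set.add d.keys key = d.keys ++ [key] := by
        simp [PySem.Set.add, PySem.Set.contains, hnm]
      have hnd' : (d.insert key line).keys.Nodup := PySem.Dict.nodup_keys_insert d key line hnd
      rw [hadd, ← hkeys, ← hvals]
      exact ih _ hnd'

-- The seen-set fold equals B's filtering loop run on the not-yet-seen pairs.
theorem uio_fold_eq_loop (lines : List String) (s : PySem.Set String) (ans : List String) :
    (lines.foldl uioStep (s, ans)).2
    = uio_loop ((lines.map (fun l => (uioKey l, l))).filter (fun p => !(PySem.Set.contains s p.1))) ans := by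
  induction lines generalizing s ans with
  | nil => simp [uio_loop]
  | cons line t ih =>
    simp only [List.foldl, List.map, List.filter, uioStep]
    by_cases h : PySem.Set.contains s (uioKey line) = true
    · simp only [h, if_true, Bool.not_true]
      exact ih s ans
    · have h' : PySem.Set.contains s (uioKey line) = false := by simpa using h
      simp only [h', Bool.false_eq_true, if_false, Bool.not_false]
      rw [ih]
      rw [show ∀ (p : String × String) t ans, uio_loop (p :: t) ans
            = uio_loop (t.filter (fun q => q.1 != p.1)) (ans ++ [p.2]) from fun _ _ _ => by
          simp only [uio_loop]]
      congr 1
      rw [List.filter_filter]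
      apply List.filter_congr
      intro p hp
      have hmem : uioKey line ∉ s := by simpa [PySem.Set.contains] using h'
      have : PySem.Set.contains (PySem.Set.add s (uioKey line)) p.1
          = (PySem.Set.contains s p.1 || p.1 == uioKey line) := by
        simp only [PySem.Set.add, PySem.Set.contains]
        by_cases hv : p.1 = uioKey line <;> simp_all
      rw [this]
      cases hcs : PySem.Set.contains s p.1 <;> cases hbe : (p.1 == uioKey line) <;> simp_all

-- ===== VERDICT =====
theorem unique_ips_only_spec : Claim_equal_unique_ips_only := by
  intro lines _
  unfold Spec_unique_ips_only unique_ips_only unique_ips_only_alt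
  have h := uio_invariant lines PySem.Dict.empty (by simp [PySem.Dict.keys, PySem.Dict.empty])
  have h0 : (PySem.Dict.empty : PySem.Dict String String).keys = PySem.Set.empty := by
    simp [PySem.Dict.keys, PySem.Dict.empty, PySem.Set.empty]
  have h1 : (PySem.Dict.empty : PySem.Dict String String).values = ([] : List String) := by
    simp [PySem.Dict.values, PySem.Dict.empty]
  rw [h0, h1] at h
  have h2 := uio_fold_eq_loop lines PySem.Set.empty []
  rw [h] at h2
  simp only [PySem.Dict.values] at h2
  have hf : (List.map (fun l => (uioKey l, l)) lines).filter
      (fun p => !(PySem.Set.contains PySem.Set.empty p.1)) = List.map (fun l => (uioKey l, l)) lines := by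
    apply (List.filter_eq_self).2
    intro p _
    simp [PySem.Set.contains, PySem.Set.empty]
  rw [hf] at h2
  simp only [foldl_append_snd, List.nil_append]
  exact h2
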